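-- pv_equiv track=rewrite | github.com/donut0310/Problem-Solving-Python- | Programmers/Level4/[2022 카카오 인턴쉽] 행렬과 연산.py | solution
-- ===== SOURCE A (Python) =====
-- from collections import deque
--
-- def rotate(first_row:deque, last_row:deque, cols:deque):
--     # rotate
--     cols[0].appendleft(first_row.popleft())
--     last_row.appendleft(cols[0].pop())
--     cols[-1].append(last_row.pop())
--     first_row.append(cols[-1].popleft())
--     return
--
-- def shiftrow(first_row:deque, last_row:deque, cols:deque):
--     cols.appendleft(cols.pop())
--     first_row.appendleft(first_row.pop())
--     last_row.appendleft(last_row.pop())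
--     return
--
-- def rebuild(first_row:deque, last_row:deque, cols:deque):
--     arr = []
--     for i in range(len(cols)):
--         tmp = []
--         tmp.append(first_row.popleft())
--         tmp.extend(list(cols[i]))
--         tmp.append(last_row.popleft())
--         arr.append(tmp)
--     return arr
--
-- def solution(rc, operations):
--     first_row, last_row = deque(), deque() # deque([]), deque([])
--     cols = deque() # deque([deque([],deque([]...))])
--     for col in rc:
--         first_row.append(col[0])
--         last_row.append(col[-1])
--         cols.append(deque(col[1:-1]))
--
--     for oper in operations:
--         if oper == "Rotate": rotate(first_row, last_row, cols)
--         elif oper == "ShiftRow": shiftrow(first_row, last_row, cols)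
--
--     answer = rebuild(first_row, last_row, cols)
--     return answer
-- ===== SOURCE B (Python) =====
-- def rotate_border(rows):
--     # one clockwise step of the outer border, done on the whole matrix at once
--     heads = [r[0] for r in rows]
--     lasts = [r[-1] for r in rows]
--     mids = [r[1:-1] for r in rows]
--     new_heads = heads[1:] + [rows[-1][1]]
--     new_lasts = [rows[0][-2]] + lasts[:-1]
--     new_mids = [rows[0][:-2]] + mids[1:-1] + [rows[-1][2:]]
--     return [[h] + m + [l] for h, m, l in zip(new_heads, new_mids, new_lasts)]
--
-- def solution(rc, operations):
--     rows = [list(r) for r in rc]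
--     for op in operations:
--         if op == "Rotate":
--             rows = rotate_border(rows)
--         elif op == "ShiftRow":
--             rows = [rows[-1]] + rows[:-1]
--     return rows
-- ===== Notes on version B (the rewrite author's own statement) =====
-- stated objective: simpler
-- what changed: B keeps the whole matrix as a list of rows and applies each operation directly to it (border rotation by slicing heads/mids/lasts and re-zipping rows, ShiftRow by moving the last row to the front), instead of A's persistent three-deque border representation with a final rebuild pass.
-- outside the precondition, e.g. on solution([[1]], []): A returns [[1, 1]], B returns [[1]]; on solution([[1, 2, 3]], ['Rotate']): A returns [[1, 3, 2]], B returns [[2, 1, 2]]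
import Mathlib
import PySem

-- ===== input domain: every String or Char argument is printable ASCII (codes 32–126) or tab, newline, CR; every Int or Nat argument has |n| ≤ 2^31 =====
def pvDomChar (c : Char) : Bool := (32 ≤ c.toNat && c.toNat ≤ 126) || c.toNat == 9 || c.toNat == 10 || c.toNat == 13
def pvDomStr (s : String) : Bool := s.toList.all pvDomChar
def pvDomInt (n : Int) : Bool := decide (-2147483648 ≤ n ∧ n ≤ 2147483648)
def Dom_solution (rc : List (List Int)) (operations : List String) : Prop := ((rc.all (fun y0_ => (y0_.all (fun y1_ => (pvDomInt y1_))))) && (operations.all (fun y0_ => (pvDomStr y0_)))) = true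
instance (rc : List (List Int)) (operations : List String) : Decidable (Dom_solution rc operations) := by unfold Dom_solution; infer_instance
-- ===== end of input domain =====

-- B replaces A's three-deque border representation (plus final rebuild) by direct whole-matrix updates per operation: simpler.

-- ===== PORT A =====
-- Deque pops on empty deques raise IndexError in Python; under Pre_solution they are never reached,
-- so the defaults (0, []) supplied here are unreachable.
def pyRotateA (fr0 lr0 : List Int) (cs0 : List (List Int)) :
    List Int × List Int × List (List Int) :=
  -- cols[0].appendleft(first_row.popleft())
  let x := fr0.headD 0
  let fr := fr0.tail
  let cs := cs0.set 0 (x :: cs0.headD [])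
  -- last_row.appendleft(cols[0].pop())
  let y := (cs.headD []).getLastD 0
  let cs := cs.set 0 (cs.headD []).dropLast
  let lr := y :: lr0
  -- cols[-1].append(last_row.pop())
  let z := lr.getLastD 0
  let lr := lr.dropLast
  let cs := cs.set (cs.length - 1) (cs.getLastD [] ++ [z])
  -- first_row.append(cols[-1].popleft())
  let w := (cs.getLastD []).headD 0
  let cs := cs.set (cs.length - 1) (cs.getLastD []).tail
  let fr := fr ++ [w]
  (fr, lr, cs)

def pyShiftrowA (fr lr : List Int) (cs : List (List Int)) :
    List Int × List Int × List (List Int) :=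
  -- deque.appendleft(deque.pop()) on each of cols, first_row, last_row
  (fr.getLastD 0 :: fr.dropLast, lr.getLastD 0 :: lr.dropLast, cs.getLastD [] :: cs.dropLast)

-- rebuild: for i in range(len(cols)): pop first_row/last_row from the left, wrap cols[i]
def pyRebuildA : List Int → List Int → List (List Int) → List (List Int)
  | _, _, [] => []
  | fr, lr, c :: cs => (fr.headD 0 :: (c ++ [lr.headD 0])) :: pyRebuildA fr.tail lr.tail cs

-- loop body of `for oper in operations`
def pyStepA (s : List Int × List Int × List (List Int)) (oper : String) :
    List Int × List Int × List (List Int) :=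
  if oper = "Rotate" then pyRotateA s.1 s.2.1 s.2.2
  else if oper = "ShiftRow" then pyShiftrowA s.1 s.2.1 s.2.2
  else s

def solution (rc : List (List Int)) (operations : List String) : List (List Int) :=
  -- for col in rc: first_row.append(col[0]); last_row.append(col[-1]); cols.append(deque(col[1:-1]))
  let st0 := rc.foldl (fun (s : List Int × List Int × List (List Int)) col =>
      (s.1 ++ [(PySem.List.pyGet? col 0).getD 0],
       s.2.1 ++ [(PySem.List.pyGet? col (-1)).getD 0],
       s.2.2 ++ [PySem.List.slice col (some 1) (some (-1))])) ([], [], [])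
  let st := operations.foldl pyStepA st0
  pyRebuildA st.1 st.2.1 st.2.2

-- ===== PORT B =====
def rotateBorder (rows : List (List Int)) : List (List Int) :=
  let heads := rows.map (fun r => (PySem.List.pyGet? r 0).getD 0)
  let lasts := rows.map (fun r => (PySem.List.pyGet? r (-1)).getD 0)
  let mids  := rows.map (fun r => PySem.List.slice r (some 1) (some (-1)))
  let fstR  := (PySem.List.pyGet? rows 0).getD []
  let lstR  := (PySem.List.pyGet? rows (-1)).getD []
  let newHeads := PySem.List.slice heads (some 1) none ++ [(PySem.List.pyGet? lstR 1).getD 0]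
  let newLasts := (PySem.List.pyGet? fstR (-2)).getD 0 :: PySem.List.slice lasts none (some (-1))
  let newMids  := PySem.List.slice fstR none (some (-2)) ::
      (PySem.List.slice mids (some 1) (some (-1)) ++ [PySem.List.slice lstR (some 2) none])
  -- [[h] + m + [l] for h, m, l in zip(new_heads, new_mids, new_lasts)]
  (newHeads.zip (newMids.zip newLasts)).map (fun t => t.1 :: (t.2.1 ++ [t.2.2]))

def stepB (rows : List (List Int)) (op : String) : List (List Int) :=
  if op = "Rotate" then rotateBorder rows
  else if op = "ShiftRow" then
    (PySem.List.pyGet? rows (-1)).getD [] :: PySem.List.slice rows none (some (-1))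
  else rows

def solution_alt (rc : List (List Int)) (operations : List String) : List (List Int) :=
  operations.foldl stepB rc

-- ===== PRECONDITION & SPEC =====
-- Pre_ restricts to the problem's natural domain: at least 2 rows, every row of length ≥ 2. A raises
-- IndexError on an empty rc with an effective operation; on 1-row or width-1 matrices A still returns,
-- but those values are artefacts of its deque representation (a width-1 row is rebuilt duplicated to
-- width 2), defensible neither way, so they are excluded rather than matched.
def Pre_solution (rc : List (List Int)) (operations : List String) : Prop :=
  2 ≤ rc.length ∧ ∀ r ∈ rc, 2 ≤ r.length
instance (rc : List (List Int)) (operations : List String) : Decidable (Pre_solution rc operations) := by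
  unfold Pre_solution; infer_instance
def pvWitness_solution : List (List Int) × List String :=
  ([[1, 2], [3, 4]], ["Rotate", "ShiftRow"])

def Spec_solution (rc : List (List Int)) (operations : List String) (out : List (List Int)) : Prop := out = solution_alt rc operations
instance (rc : List (List Int)) (operations : List String) (out : List (List Int)) : Decidable (Spec_solution rc operations out) := by unfold Spec_solution; infer_instance

-- ===== CLAIM (what is proved, stated in full; the proofs are below) =====
def Claim_equal_solution : Prop := ∀ (rc : List (List Int)) (operations : List String), Dom_solution rc operations → Pre_solution rc operations → Spec_solution rc operations (solution rc operations)

-- ===== LEMMAS AND PROOFS =====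

-- the three border components of a matrix: first column, last column, middles of each row
def pvF (M : List (List Int)) : List Int := M.map (fun r => r.headD 0)
def pvL (M : List (List Int)) : List Int := M.map (fun r => r.getLastD 0)
def pvC (M : List (List Int)) : List (List Int) := M.map (fun r => r.tail.dropLast)

def pvShape (M : List (List Int)) : Prop := 2 ≤ M.length ∧ ∀ r ∈ M, 2 ≤ r.length

theorem pv_pg0 {α : Type} (r : List α) (d : α) : (PySem.List.pyGet? r 0).getD d = r.headD d := by
  cases r <;> simp [PySem.List.pyGet?, PySem.List.pyIdx?]

theorem pv_pg1 (r : List Int) : (PySem.List.pyGet? r 1).getD 0 = r.tail.headD 0 := by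
  cases r with
  | nil => simp [PySem.List.pyGet?, PySem.List.pyIdx?]
  | cons a u => cases u <;> simp [PySem.List.pyGet?, PySem.List.pyIdx?]

theorem pv_pgneg1 {α : Type} (r : List α) (d : α) : (PySem.List.pyGet? r (-1)).getD d = r.getLastD d := by
  simp [PySem.List.pyGet?_neg_one, List.getLastD_eq_getLast?]

theorem pv_pgneg2 (r : List Int) (h : 2 ≤ r.length) :
    (PySem.List.pyGet? r (-2)).getD 0 = r.dropLast.getLastD 0 := by
  rw [PySem.List.pyGet?_neg_ofNat r 2 (by omega) (by omega)]
  rw [List.getLastD_eq_getLast?, List.getLast?_eq_getElem?]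
  simp [List.length_dropLast]
  rw [List.getElem?_dropLast, if_pos (by omega), Nat.sub_sub]

theorem pv_s11 {α : Type} (r : List α) :
    PySem.List.slice r (some 1) (some (-1)) = r.tail.dropLast := by
  cases r with
  | nil => simp [PySem.List.slice]
  | cons a u =>
    rw [List.dropLast_eq_take]
    simp [PySem.List.slice, PySem.List.clampIdx]
    split_ifs with hh
    · omega
    · omega

theorem pv_sneg2 {α : Type} (r : List α) :
    PySem.List.slice r none (some (-2)) = r.dropLast.dropLast := by
  rw [PySem.List.slice_to_neg_ofNat r 2 (by omega), List.dropLast_eq_take, List.dropLast_eq_take,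
      List.take_take, List.length_take]
  congr 1
  omega

theorem pv_s2 {α : Type} (r : List α) :
    PySem.List.slice r (some 2) none = r.tail.tail := by
  rw [PySem.List.slice_from r (show (0:Int) ≤ 2 by omega)]
  simp [← List.drop_one, List.drop_drop]

theorem pv_cons_dropLast (r : List Int) (h : 2 ≤ r.length) :
    r.headD 0 :: r.tail.dropLast = r.dropLast := by
  cases r with
  | nil => simp at h
  | cons a u => cases u <;> simp_all

theorem pv_tail_rec (r : List Int) (h : 2 ≤ r.length) :
    r.tail.dropLast ++ [r.getLastD 0] = r.tail := by
  cases r with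
  | nil => simp at h
  | cons a u =>
    have hu : u ≠ [] := by cases u <;> simp_all
    simp only [List.tail_cons, List.getLastD_eq_getLast?, List.getLast?_cons,
      List.getLast?_eq_some_getLast hu]
    simp [List.dropLast_append_getLast hu]

theorem pv_set_last {α : Type} (l : List α) (a b : α) :
    (l ++ [a]).set l.length b = l ++ [b] := by
  induction l with
  | nil => simp
  | cons x xs ih => simp [ih]

theorem pv_dl_cons_concat {α : Type} (x : α) (l : List α) (y : α) :
    (x :: (l ++ [y])).dropLast = x :: l := by
  rw [← List.cons_append, List.dropLast_concat]

theorem pv_glq_cons_concat {α : Type} (x : α) (l : List α) (y d : α) :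
    (x :: (l ++ [y])).getLast?.getD d = y := by
  rw [← List.cons_append, List.getLast?_concat]; rfl

theorem pv_set_last_cons {α : Type} (x : α) (l : List α) (y v : α) :
    (x :: (l ++ [y])).set ((x :: (l ++ [y])).length - 1) v = x :: (l ++ [v]) := by
  have hlen : (x :: (l ++ [y])).length - 1 = (x :: l).length := by simp
  rw [hlen, ← List.cons_append, ← List.cons_append]
  exact pv_set_last (x :: l) y v

theorem pv_maps_zip3 (hs : List Int) (ms : List (List Int)) (ls : List Int)
    (h1 : hs.length = ms.length) (h2 : ms.length = ls.length) :
    pvF ((hs.zip (ms.zip ls)).map (fun t => t.1 :: (t.2.1 ++ [t.2.2]))) = hs ∧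
    pvL ((hs.zip (ms.zip ls)).map (fun t => t.1 :: (t.2.1 ++ [t.2.2]))) = ls ∧
    pvC ((hs.zip (ms.zip ls)).map (fun t => t.1 :: (t.2.1 ++ [t.2.2]))) = ms := by
  induction hs generalizing ms ls with
  | nil =>
    cases ms with
    | nil => cases ls <;> simp_all [pvF, pvL, pvC]
    | cons m mt => simp at h1
  | cons h ht ih =>
    cases ms with
    | nil => simp at h1
    | cons m mt =>
      cases ls with
      | nil => simp at h2
      | cons l lt =>
        have := ih mt lt (by simpa using h1) (by simpa using h2)
        simp_all [pvF, pvL, pvC, pv_glq_cons_concat]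

theorem pv_rotateA_explicit (r0 rl : List Int) (m : List (List Int))
    (h0 : 2 ≤ r0.length) (hl : 2 ≤ rl.length) :
    pyRotateA (pvF (r0 :: (m ++ [rl]))) (pvL (r0 :: (m ++ [rl]))) (pvC (r0 :: (m ++ [rl])))
      = ((pvF m ++ [rl.headD 0]) ++ [rl.tail.headD 0],
         r0.dropLast.getLastD 0 :: (r0.getLastD 0 :: pvL m),
         r0.dropLast.dropLast :: (pvC m ++ [rl.tail.tail])) := by
  simp only [pyRotateA, pvF, pvL, pvC, List.map_cons, List.map_append, List.map_nil]
  simp only [List.headD_cons, List.tail_cons, List.set_cons_zero]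
  rw [pv_cons_dropLast r0 h0]
  simp only [List.getLastD_cons, List.getLastD_concat, List.dropLast_cons₂,
    pv_dl_cons_concat, pv_set_last_cons, pv_tail_rec rl hl, List.append_assoc]

theorem pv_rotateB_explicit (r0 rl : List Int) (m : List (List Int))
    (h0 : 2 ≤ r0.length) :
    rotateBorder (r0 :: (m ++ [rl]))
      = ((((pvF m ++ [rl.headD 0]) ++ [rl.tail.headD 0]).zip
          ((r0.dropLast.dropLast :: (pvC m ++ [rl.tail.tail])).zip
           (r0.dropLast.getLastD 0 :: (r0.getLastD 0 :: pvL m)))).map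
          (fun t => t.1 :: (t.2.1 ++ [t.2.2]))) := by
  simp only [rotateBorder, pv_pg0, pv_pg1, pv_pgneg1, pv_s11, pv_sneg2, pv_s2,
    PySem.List.slice_from_one, PySem.List.slice_to_neg_one,
    pvF, pvL, pvC, List.map_cons, List.map_append, List.map_nil,
    List.headD_cons, List.tail_cons, List.getLastD_cons, List.getLastD_concat,
    pv_dl_cons_concat, List.dropLast_concat, List.append_assoc]
  rw [pv_pgneg2 r0 h0]

theorem pv_rotate_corr (M : List (List Int)) (h : pvShape M) :
    pyRotateA (pvF M) (pvL M) (pvC M)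
      = (pvF (rotateBorder M), pvL (rotateBorder M), pvC (rotateBorder M))
    ∧ pvShape (rotateBorder M) := by
  obtain ⟨hlen, hrows⟩ := h
  cases M with
  | nil => simp at hlen
  | cons r0 t =>
    have ht : t ≠ [] := by cases t <;> simp_all
    have hdec : t = t.dropLast ++ [t.getLast ht] := (List.dropLast_append_getLast ht).symm
    obtain ⟨m, rl, hM⟩ : ∃ m rl, t = m ++ [rl] := ⟨t.dropLast, t.getLast ht, hdec⟩
    subst hM
    have h0 : 2 ≤ r0.length := hrows r0 (by simp)
    have hl : 2 ≤ rl.length := hrows rl (by simp)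
    have hz := pv_maps_zip3 ((pvF m ++ [rl.headD 0]) ++ [rl.tail.headD 0])
      (r0.dropLast.dropLast :: (pvC m ++ [rl.tail.tail]))
      (r0.dropLast.getLastD 0 :: (r0.getLastD 0 :: pvL m))
      (by simp [pvF, pvC]) (by simp [pvC, pvL])
    rw [pv_rotateA_explicit r0 rl m h0 hl, pv_rotateB_explicit r0 rl m h0]
    refine ⟨by rw [hz.1, hz.2.1, hz.2.2], ?_, ?_⟩
    · simp [List.length_zip, pvF, pvC, pvL]
    · intro r hr
      simp only [List.mem_map] at hr
      obtain ⟨tup, _, rfl⟩ := hr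
      simp

theorem pv_stepB_shift (M : List (List Int)) :
    stepB M "ShiftRow" = (PySem.List.pyGet? M (-1)).getD [] :: PySem.List.slice M none (some (-1)) := by
  simp [stepB]

theorem pv_shift_corr (M : List (List Int)) (h : pvShape M) :
    pyShiftrowA (pvF M) (pvL M) (pvC M)
      = (pvF (stepB M "ShiftRow"), pvL (stepB M "ShiftRow"), pvC (stepB M "ShiftRow"))
    ∧ pvShape (stepB M "ShiftRow") := by
  obtain ⟨hlen, hrows⟩ := h
  rw [pv_stepB_shift]
  cases M with
  | nil => simp at hlen
  | cons r0 t =>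
    have ht : t ≠ [] := by cases t <;> simp_all
    obtain ⟨m, rl, hM⟩ : ∃ m rl, t = m ++ [rl] :=
      ⟨t.dropLast, t.getLast ht, (List.dropLast_append_getLast ht).symm⟩
    subst hM
    constructor
    · simp only [pyShiftrowA, pv_pgneg1, pvF, pvL, pvC, List.map_cons, List.map_append,
        List.map_nil, List.getLastD_cons, List.getLastD_concat, pv_dl_cons_concat,
        PySem.List.slice_to_neg_one]
    · constructor
      · simp [pv_pgneg1, PySem.List.slice_to_neg_one, pv_dl_cons_concat]
      · intro r hr
        simp only [pv_pgneg1, PySem.List.slice_to_neg_one, pv_dl_cons_concat,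
          List.getLastD_cons, List.getLastD_concat, List.mem_cons] at hr
        rcases hr with rfl | hr
        · exact hrows r (by simp)
        · exact hrows r (by rcases hr with rfl | hr <;> simp_all)

theorem pv_loop_corr (ops : List String) (M : List (List Int)) (h : pvShape M) :
    ops.foldl pyStepA (pvF M, pvL M, pvC M)
      = (pvF (ops.foldl stepB M), pvL (ops.foldl stepB M), pvC (ops.foldl stepB M))
    ∧ pvShape (ops.foldl stepB M) := by
  induction ops generalizing M with
  | nil => exact ⟨rfl, h⟩
  | cons op ops ih =>
    by_cases hrot : op = "Rotate"
    · subst hrot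
      obtain ⟨heq, hsh⟩ := pv_rotate_corr M h
      have hstepA : pyStepA (pvF M, pvL M, pvC M) "Rotate"
          = (pvF (rotateBorder M), pvL (rotateBorder M), pvC (rotateBorder M)) := by
        simpa [pyStepA] using heq
      have hstepB : stepB M "Rotate" = rotateBorder M := by simp [stepB]
      simpa [List.foldl_cons, hstepA, hstepB] using ih (rotateBorder M) hsh
    · by_cases hsh : op = "ShiftRow"
      · subst hsh
        obtain ⟨heq, hshp⟩ := pv_shift_corr M h
        have hstepA : pyStepA (pvF M, pvL M, pvC M) "ShiftRow"
            = (pvF (stepB M "ShiftRow"), pvL (stepB M "ShiftRow"), pvC (stepB M "ShiftRow")) := by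
          simpa [pyStepA] using heq
        simpa [List.foldl_cons, hstepA] using ih (stepB M "ShiftRow") hshp
      · have hstepA : pyStepA (pvF M, pvL M, pvC M) op = (pvF M, pvL M, pvC M) := by
          simp [pyStepA, hrot, hsh]
        have hstepB : stepB M op = M := by simp [stepB, hrot, hsh]
        simpa [List.foldl_cons, hstepA, hstepB] using ih M h

theorem pv_init_gen (rc : List (List Int)) (a b : List Int) (c : List (List Int)) :
    rc.foldl (fun (s : List Int × List Int × List (List Int)) col =>
      (s.1 ++ [(PySem.List.pyGet? col 0).getD 0],
       s.2.1 ++ [(PySem.List.pyGet? col (-1)).getD 0],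
       s.2.2 ++ [PySem.List.slice col (some 1) (some (-1))])) (a, b, c)
    = (a ++ pvF rc, b ++ pvL rc, c ++ pvC rc) := by
  induction rc generalizing a b c with
  | nil => simp [pvF, pvL, pvC]
  | cons r rc ih =>
    rw [List.foldl_cons, ih]
    simp [pvF, pvL, pvC, pv_pg0, pv_pgneg1, pv_s11]

theorem pv_rebuild (M : List (List Int)) (h : ∀ r ∈ M, 2 ≤ r.length) :
    pyRebuildA (pvF M) (pvL M) (pvC M) = M := by
  induction M with
  | nil => simp [pvF, pvL, pvC, pyRebuildA]
  | cons r M ih =>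
    have hr := h r (by simp)
    simp only [pvF, pvL, pvC, List.map_cons, pyRebuildA, List.headD_cons, List.tail_cons]
    rw [pv_tail_rec r hr]
    have hh : r.headD 0 :: r.tail = r := by
      cases r with | nil => simp at hr | cons a u => simp
    rw [hh]
    have := ih (fun s hs => h s (by simp [hs]))
    simp_all [pvF, pvL, pvC]


-- ===== VERDICT (by name: the statement is the Claim_ definition above) =====
theorem solution_spec : Claim_equal_solution := by
  intro rc ops _ hpre
  have hsh : pvShape rc := ⟨hpre.1, hpre.2⟩
  obtain ⟨heq, hshape⟩ := pv_loop_corr ops rc hsh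
  simp only [Spec_solution, solution, solution_alt, pv_init_gen, List.nil_append, heq]
  exact pv_rebuild _ hshape.2
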